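-- pv_equiv track=rewrite | github.com/msaedi/instructly | mcp-server/src/instainstru_mcp/tools/command_center.py | calculate_status
-- ===== SOURCE A (Python) =====
-- from typing import Any, Awaitable, Callable
--
-- def calculate_status(checks: list[dict[str, Any]]) -> str:
--     """Aggregate check statuses: worst wins."""
--     statuses = [c.get("status") for c in checks if c.get("status")]
--     if "critical" in statuses:
--         return "critical"
--     if "warning" in statuses:
--         return "warning"
--     if "unknown" in statuses:
--         return "unknown"
--     return "ok"
-- ===== SOURCE B (Python) =====
-- def calculate_status(checks: list[dict[str, object]]) -> str:
--     """Aggregate check statuses: worst wins (single pass over a rank scale)."""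
--     RANK = {"critical": 3, "warning": 2, "unknown": 1}
--     worst = 0
--     for c in checks:
--         r = RANK.get(c.get("status"), 0)
--         if r > worst:
--             worst = r
--     if worst == 3:
--         return "critical"
--     if worst == 2:
--         return "warning"
--     if worst == 1:
--         return "unknown"
--     return "ok"
-- ===== Notes on version B (the rewrite author's own statement) =====
-- stated objective: simpler
-- what changed: Replaces the intermediate status list and up to three membership scans with a single pass that keeps a running maximum severity rank and maps it back to a name at the end.
import Mathlib
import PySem

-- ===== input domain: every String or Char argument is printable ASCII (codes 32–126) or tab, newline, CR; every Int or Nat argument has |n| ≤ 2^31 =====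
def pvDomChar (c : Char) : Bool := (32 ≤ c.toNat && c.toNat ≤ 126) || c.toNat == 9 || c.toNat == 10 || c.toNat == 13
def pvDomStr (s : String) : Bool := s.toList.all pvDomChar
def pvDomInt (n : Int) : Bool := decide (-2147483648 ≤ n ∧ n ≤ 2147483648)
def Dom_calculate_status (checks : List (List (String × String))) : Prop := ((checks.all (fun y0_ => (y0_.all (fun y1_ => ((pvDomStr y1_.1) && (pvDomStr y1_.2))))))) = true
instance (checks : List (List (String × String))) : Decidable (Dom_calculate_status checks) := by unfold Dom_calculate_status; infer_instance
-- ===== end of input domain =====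

-- B replaces A's intermediate status list and its up-to-three membership scans with a
-- single pass keeping a running maximum severity rank, mapped back to a name at the end.

-- ===== PORT A =====
-- statuses = [c.get("status") for c in checks if c.get("status")]  (truthy = non-empty string)
def calculate_status (checks : List (List (String × String))) : String :=
  let statuses := checks.filterMap (fun c =>
    match c.lookup "status" with
    | some s => if s ≠ "" then some s else none
    | none => none)
  if statuses.contains "critical" then "critical"
  else if statuses.contains "warning" then "warning"
  else if statuses.contains "unknown" then "unknown"
  else "ok"

-- ===== PORT B =====
-- RANK.get(c.get("status"), 0)
def pvRankB (s : Option String) : Nat :=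
  match s with
  | some "critical" => 3
  | some "warning" => 2
  | some "unknown" => 1
  | _ => 0

def calculate_status_alt (checks : List (List (String × String))) : String :=
  let worst := checks.foldl (fun w c =>
    let r := pvRankB (c.lookup "status")
    if r > w then r else w) 0
  if worst = 3 then "critical"
  else if worst = 2 then "warning"
  else if worst = 1 then "unknown"
  else "ok"

-- ===== PRECONDITION & SPEC =====
def Spec_calculate_status (checks : List (List (String × String))) (out : String) : Prop := out = calculate_status_alt checks
instance (checks : List (List (String × String))) (out : String) : Decidable (Spec_calculate_status checks out) := by unfold Spec_calculate_status; infer_instance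

-- ===== CLAIM (what is proved, stated in full; the proofs are below) =====
def Claim_equal_calculate_status : Prop := ∀ (checks : List (List (String × String))), Dom_calculate_status checks → Spec_calculate_status checks (calculate_status checks)

-- ===== LEMMAS AND PROOFS =====

/-- Recursive description of B's running maximum. -/
def pvWorstOf : List (List (String × String)) → Nat
  | [] => 0
  | c :: cs => max (pvRankB (c.lookup "status")) (pvWorstOf cs)

theorem pvRankB_le (s : Option String) : pvRankB s ≤ 3 := by
  unfold pvRankB; split <;> omega

theorem pvRankB_eq_three (s : Option String) : pvRankB s = 3 ↔ s = some "critical" := by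
  unfold pvRankB; split <;> simp_all

theorem pvRankB_eq_two (s : Option String) : pvRankB s = 2 ↔ s = some "warning" := by
  unfold pvRankB; split <;> simp_all

theorem pvRankB_eq_one (s : Option String) : pvRankB s = 1 ↔ s = some "unknown" := by
  unfold pvRankB; split <;> simp_all

theorem pvWorstOf_le (checks : List (List (String × String))) : pvWorstOf checks ≤ 3 := by
  induction checks with
  | nil => simp [pvWorstOf]
  | cons c cs ih => simp only [pvWorstOf, Nat.max_le]; exact ⟨pvRankB_le _, ih⟩

theorem pvWorstOf_ge (k : Nat) (hk : 1 ≤ k) (checks : List (List (String × String))) :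
    k ≤ pvWorstOf checks ↔ ∃ c ∈ checks, k ≤ pvRankB (c.lookup "status") := by
  induction checks with
  | nil => simp [pvWorstOf]; omega
  | cons c cs ih =>
      simp only [pvWorstOf, le_max_iff, ih, List.mem_cons]
      aesop

theorem pvFoldl_worst (checks : List (List (String × String))) (w : Nat) :
    checks.foldl (fun w c =>
      let r := pvRankB (c.lookup "status")
      if r > w then r else w) w = max w (pvWorstOf checks) := by
  induction checks generalizing w with
  | nil => simp [pvWorstOf]
  | cons c cs ih =>
      simp only [List.foldl_cons, pvWorstOf, ih]
      split <;> omega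

/-- Membership in A's filtered status list, for a non-empty target string. -/
theorem pvContains_statuses (checks : List (List (String × String))) (t : String) (ht : t ≠ "") :
    (checks.filterMap (fun c =>
      match c.lookup "status" with
      | some s => if s ≠ "" then some s else none
      | none => none)).contains t = true ↔ ∃ c ∈ checks, c.lookup "status" = some t := by
  simp only [List.contains_iff_mem, List.mem_filterMap]
  constructor
  · rintro ⟨c, hc, hf⟩
    refine ⟨c, hc, ?_⟩
    revert hf
    split
    · split <;> intro h <;> simp_all
    · intro h; simp_all
  · rintro ⟨c, hc, hf⟩
    exact ⟨c, hc, by simp [hf, ht]⟩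

theorem pvExists_rank (checks : List (List (String × String))) (t : String)
    (k : Nat) (hk : ∀ s, pvRankB s = k ↔ s = some t) :
    (∃ c ∈ checks, c.lookup "status" = some t) ↔
      ∃ c ∈ checks, pvRankB (c.lookup "status") = k := by
  constructor
  · rintro ⟨c, hc, h⟩; exact ⟨c, hc, (hk _).mpr h⟩
  · rintro ⟨c, hc, h⟩; exact ⟨c, hc, (hk _).mp h⟩

-- ===== VERDICT (by name: the statement is the Claim_ definition above) =====
theorem calculate_status_spec : Claim_equal_calculate_status := by
  intro checks _
  unfold Spec_calculate_status calculate_status calculate_status_alt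
  simp only [pvFoldl_worst, Nat.zero_max]
  have hle := pvWorstOf_le checks
  have hcrit : (checks.filterMap (fun c =>
      match c.lookup "status" with
      | some s => if s ≠ "" then some s else none
      | none => none)).contains "critical" = true ↔ pvWorstOf checks = 3 := by
    rw [pvContains_statuses _ _ (by decide),
        pvExists_rank checks "critical" 3 pvRankB_eq_three]
    constructor
    · rintro ⟨c, hc, h⟩
      have := (pvWorstOf_ge 3 (by omega) checks).mpr ⟨c, hc, by omega⟩
      omega
    · intro h
      obtain ⟨c, hc, h3⟩ := (pvWorstOf_ge 3 (by omega) checks).mp (by omega)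
      exact ⟨c, hc, by have := pvRankB_le (c.lookup "status"); omega⟩
  have hwarn : (checks.filterMap (fun c =>
      match c.lookup "status" with
      | some s => if s ≠ "" then some s else none
      | none => none)).contains "warning" = true ↔
      ∃ c ∈ checks, pvRankB (c.lookup "status") = 2 := by
    rw [pvContains_statuses _ _ (by decide)]
    exact pvExists_rank checks "warning" 2 pvRankB_eq_two
  have hunk : (checks.filterMap (fun c =>
      match c.lookup "status" with
      | some s => if s ≠ "" then some s else none
      | none => none)).contains "unknown" = true ↔
      ∃ c ∈ checks, pvRankB (c.lookup "status") = 1 := by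
    rw [pvContains_statuses _ _ (by decide)]
    exact pvExists_rank checks "unknown" 1 pvRankB_eq_one
  by_cases h3 : pvWorstOf checks = 3
  · rw [if_pos (hcrit.mpr h3), if_pos h3]
  · have hnc : ¬ (checks.filterMap (fun c =>
      match c.lookup "status" with
      | some s => if s ≠ "" then some s else none
      | none => none)).contains "critical" = true := fun h => h3 (hcrit.mp h)
    by_cases h2 : pvWorstOf checks = 2
    · have : ∃ c ∈ checks, pvRankB (c.lookup "status") = 2 := by
        obtain ⟨c, hc, hr⟩ := (pvWorstOf_ge 2 (by omega) checks).mp (by omega)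
        have hle3 := pvRankB_le (c.lookup "status")
        have hne3 : pvRankB (c.lookup "status") ≠ 3 := by
          intro h
          have := (pvWorstOf_ge 3 (by omega) checks).mpr ⟨c, hc, by omega⟩
          omega
        exact ⟨c, hc, by omega⟩
      rw [if_neg hnc, if_pos (hwarn.mpr this), if_neg h3, if_pos h2]
    · have hnw : ¬ (checks.filterMap (fun c =>
      match c.lookup "status" with
      | some s => if s ≠ "" then some s else none
      | none => none)).contains "warning" = true := by
        intro h
        obtain ⟨c, hc, hr⟩ := hwarn.mp h
        have := (pvWorstOf_ge 2 (by omega) checks).mpr ⟨c, hc, by omega⟩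
        omega
      by_cases h1 : pvWorstOf checks = 1
      · have : ∃ c ∈ checks, pvRankB (c.lookup "status") = 1 := by
          obtain ⟨c, hc, hr⟩ := (pvWorstOf_ge 1 (by omega) checks).mp (by omega)
          have hle3 := pvRankB_le (c.lookup "status")
          have hge2 : ¬ 2 ≤ pvRankB (c.lookup "status") := by
            intro h
            have := (pvWorstOf_ge 2 (by omega) checks).mpr ⟨c, hc, h⟩
            omega
          exact ⟨c, hc, by omega⟩
        rw [if_neg hnc, if_neg hnw, if_pos (hunk.mpr this), if_neg h3, if_neg h2, if_pos h1]
      · have hnu : ¬ (checks.filterMap (fun c =>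
      match c.lookup "status" with
      | some s => if s ≠ "" then some s else none
      | none => none)).contains "unknown" = true := by
          intro h
          obtain ⟨c, hc, hr⟩ := hunk.mp h
          have := (pvWorstOf_ge 1 (by omega) checks).mpr ⟨c, hc, by omega⟩
          omega
        rw [if_neg hnc, if_neg hnw, if_neg hnu, if_neg h3, if_neg h2, if_neg h1]
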